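-- pv_equiv track=rewrite | github.com/coldbeeen/cote_study | programmers/택배 배달과 수거하기_sungwoo.py | solution
-- ===== SOURCE A (Python) =====
-- def solution(cap, n, deliveries, pickups):
--
--     i = n - 1  # 배달/수거를 수행해야 할 가장 먼 집의 위치(인덱스)이며, i를 감소시키며 진행할 것임
--     result = 0
--
--     while i >= 0:  # 모든 집의 배달/수거를 마칠 때까지 반복 (매 반복이 왕복 한 번을 의미)
--
--         while i >= 0 and deliveries[i] == pickups[i] == 0:  # 배달/수거가 필요 없는 집은 건너뜀
--             i -= 1
--
--         result += (i + 1) * 2  # 트럭의 이동 거리 계산 후 누적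
--
--         d_cnt, p_cnt = 0, 0  # 이번 왕복에서 배달/수거할 상자 개수
--         while i >= 0:  # 배달/수거 상자 개수가 cap을 초과하지 않는 범위까지 i를 감소
--             if d_cnt + deliveries[i] > cap or p_cnt + pickups[i] > cap:
--                 break
--             d_cnt += deliveries[i]
--             p_cnt += pickups[i]
--             i -= 1
--
--         deliveries[i] -= cap - d_cnt  # 상자를 cap만큼 배달/수거해야 가장 효율적이므로 남은 여유분만큼 i 위치의 상자 개수를 감소
--         pickups[i] -= cap - p_cnt
--
--     return result
-- ===== SOURCE B (Python) =====
-- # One far-to-near pass; repeated trips at a position are batched into one ceil-division count; does not mutate its list arguments (A does, in place; the equivalence is about the return value).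
-- def solution(cap, n, deliveries, pickups):
--     result = 0
--     opened = False
--     dc = pc = 0
--     for k in range(n - 1, -1, -1):
--         dv, pv = deliveries[k], pickups[k]
--         if not opened:
--             if dv == 0 and pv == 0:
--                 continue
--             opened = True
--             result += 2 * (k + 1)
--         if dc + dv > cap or pc + pv > cap:
--             dv -= cap - dc
--             pv -= cap - pc
--             t = max(0, -(-(dv - cap) // cap), -(-(pv - cap) // cap))
--             result += 2 * (k + 1) * (t + 1)
--             dc = dv - cap * t
--             pc = pv - cap * t
--         else:
--             dc += dv
--             pc += pv
--     return result
-- ===== Notes on version B (the rewrite author's own statement) =====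
-- stated objective: alternative
-- what changed: A simulates the truck trip by trip (an outer while-loop that re-scans, skips empty houses and mutates the box arrays with credit subtractions, one iteration per round trip); B makes one far-to-near pass over the houses, batching all repeated trips at a position into a single ceil-division count, and never mutates its inputs.
-- outside the precondition, e.g. on solution(0, 1, [0], [0]): A returns 0, B returns 0; on solution(1, 1, [-1], [0]): A returns 2, B returns 2; on solution(2, 3, [1, 1], [0, 0]): A raises IndexError, B raises IndexError
import Mathlib
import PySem

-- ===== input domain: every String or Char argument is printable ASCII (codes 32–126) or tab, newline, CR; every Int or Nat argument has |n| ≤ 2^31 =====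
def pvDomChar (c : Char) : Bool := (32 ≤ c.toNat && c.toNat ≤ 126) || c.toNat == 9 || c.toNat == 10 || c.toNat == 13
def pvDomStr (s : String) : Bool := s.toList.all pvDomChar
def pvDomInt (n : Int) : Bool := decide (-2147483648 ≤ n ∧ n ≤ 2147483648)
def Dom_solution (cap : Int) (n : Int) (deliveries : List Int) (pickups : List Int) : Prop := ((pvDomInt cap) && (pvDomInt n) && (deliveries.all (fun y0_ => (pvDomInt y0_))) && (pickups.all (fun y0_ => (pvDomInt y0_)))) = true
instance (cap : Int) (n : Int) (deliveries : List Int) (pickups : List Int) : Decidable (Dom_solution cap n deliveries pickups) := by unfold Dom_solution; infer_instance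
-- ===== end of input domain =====

-- B replaces A's trip-by-trip simulation (which also mutates its list arguments; B does not —
-- the equivalence is about the return value) by one far-to-near pass over suffix sums with
-- ceil-division trip counts.

-- ===== PORT A =====
-- helpers used by port A only to compute a termination fuel for the outer while-loop
-- (the loop body itself is a literal port); the fuel is proved sufficient under Pre_.
def pvCeil (cap x : Int) : Int := -(PySem.Int.floordiv (-x) cap)

def pvS (xs : List Int) (a b : Int) : Int :=
  ∑ k ∈ Finset.range (b + 1 - a).toNat, PySem.List.pyGetD xs (a + k) 0

def pvT (cap : Int) (d p : List Int) (i : Int) : Int :=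
  ∑ j ∈ Finset.range (i + 1).toNat, max 0 (pvCeil cap (max (pvS d j i) (pvS p j i)))

-- while i >= 0 and deliveries[i] == pickups[i] == 0: i -= 1
def pvSkip (d p : List Int) (i : Int) : Int :=
  if h : 0 ≤ i ∧ PySem.List.pyGetD d i 0 = 0 ∧ PySem.List.pyGetD p i 0 = 0 then
    pvSkip d p (i - 1)
  else i
termination_by (i + 1).toNat
decreasing_by omega

-- the inner while loop accumulating d_cnt, p_cnt
def pvTake (cap : Int) (d p : List Int) (i dcnt pcnt : Int) : Int × Int × Int :=
  if h : 0 ≤ i then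
    if dcnt + PySem.List.pyGetD d i 0 > cap ∨ pcnt + PySem.List.pyGetD p i 0 > cap then
      (i, dcnt, pcnt)
    else
      pvTake cap d p (i - 1) (dcnt + PySem.List.pyGetD d i 0) (pcnt + PySem.List.pyGetD p i 0)
  else (i, dcnt, pcnt)
termination_by (i + 1).toNat
decreasing_by omega

-- lst[i] -= x  (i may be -1: Python wraps negative indexes; exact for -len ≤ i < len)
def pvSubAt (xs : List Int) (i x : Int) : List Int :=
  PySem.List.pySetD xs i (PySem.List.pyGetD xs i 0 - x)

-- the outer while loop
def pvOuter (cap : Int) : Nat → Int → List Int → List Int → Int → Int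
  | 0, _, _, _, result => result
  | fuel + 1, i, d, p, result =>
    if 0 ≤ i then
      let i1 := pvSkip d p i
      let t := pvTake cap d p i1 0 0
      pvOuter cap fuel t.1 (pvSubAt d t.1 (cap - t.2.1)) (pvSubAt p t.1 (cap - t.2.2))
        (result + (i1 + 1) * 2)
    else result

def solution (cap : Int) (n : Int) (deliveries : List Int) (pickups : List Int) : Int :=
  pvOuter cap ((pvT cap deliveries pickups (n - 1)).toNat + 1) (n - 1) deliveries pickups 0

-- ===== PORT B =====
-- loop body of Source B: state (result, opened, dc, pc), one index k
def pvStep (cap : Int) (deliveries pickups : List Int) (st : Int × Bool × Int × Int) (k : Int) :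
    Int × Bool × Int × Int :=
  let dv := PySem.List.pyGetD deliveries k 0
  let pv := PySem.List.pyGetD pickups k 0
  if st.2.1 = false ∧ dv = 0 ∧ pv = 0 then st
  else
    let result := if st.2.1 then st.1 else st.1 + 2 * (k + 1)
    let dc := st.2.2.1
    let pc := st.2.2.2
    if cap < dc + dv ∨ cap < pc + pv then
      let dv1 := dv - (cap - dc)
      let pv1 := pv - (cap - pc)
      let t := max 0 (max (-(PySem.Int.floordiv (-(dv1 - cap)) cap))
                         (-(PySem.Int.floordiv (-(pv1 - cap)) cap)))
      (result + 2 * (k + 1) * (t + 1), true, dv1 - cap * t, pv1 - cap * t)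
    else (result, true, dc + dv, pc + pv)

def solution_alt (cap : Int) (n : Int) (deliveries : List Int) (pickups : List Int) : Int :=
  ((PySem.List.pyRange (n - 1) (-1) (-1)).foldl (pvStep cap deliveries pickups)
    (0, false, 0, 0)).1

-- ===== PRECONDITION & SPEC =====
-- Pre_ restricts to the task's natural domain: cap ≥ 1 (A diverges for cap ≤ 0 whenever any
-- box remains), lists at least n long (A raises IndexError otherwise), and nonnegative box
-- counts among the first n entries (negative counts are outside the problem's domain; the
-- Python B still matches A there, but the proof does not cover them).
def Pre_solution (cap : Int) (n : Int) (deliveries : List Int) (pickups : List Int) : Prop :=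
  1 ≤ cap ∧ n ≤ (deliveries.length : Int) ∧ n ≤ (pickups.length : Int) ∧
  (∀ x ∈ deliveries.take n.toNat, 0 ≤ x) ∧ (∀ x ∈ pickups.take n.toNat, 0 ≤ x)
instance (cap : Int) (n : Int) (deliveries : List Int) (pickups : List Int) : Decidable (Pre_solution cap n deliveries pickups) := by unfold Pre_solution; infer_instance

def pvWitness_solution : Int × Int × List Int × List Int := (2, 2, [1, 2], [0, 3])

def Spec_solution (cap : Int) (n : Int) (deliveries : List Int) (pickups : List Int) (out : Int) : Prop := out = solution_alt cap n deliveries pickups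
instance (cap : Int) (n : Int) (deliveries : List Int) (pickups : List Int) (out : Int) : Decidable (Spec_solution cap n deliveries pickups out) := by unfold Spec_solution; infer_instance

-- ===== CLAIM (what is proved, stated in full; the proofs are below) =====
def Claim_equal_solution : Prop := ∀ (cap : Int) (n : Int) (deliveries : List Int) (pickups : List Int), Dom_solution cap n deliveries pickups → Pre_solution cap n deliveries pickups → Spec_solution cap n deliveries pickups (solution cap n deliveries pickups)

-- ===== LEMMAS AND PROOFS =====

theorem pvCeil_bracket (cap x : Int) (hc : 1 ≤ cap) :
    (pvCeil cap x - 1) * cap < x ∧ x ≤ pvCeil cap x * cap := by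
  have := (PySem.Int.neg_floordiv_neg_eq_iff_of_pos (a := x) (b := cap) (q := pvCeil cap x)
    (by omega)).mp rfl
  exact this

theorem pvCeil_of_bracket (cap x q : Int) (hc : 1 ≤ cap) (h1 : (q - 1) * cap < x)
    (h2 : x ≤ q * cap) : pvCeil cap x = q := by
  exact (PySem.Int.neg_floordiv_neg_eq_iff_of_pos (a := x) (b := cap) (q := q)
    (by omega)).mpr ⟨h1, h2⟩

theorem pvCeil_zero (cap : Int) (hc : 1 ≤ cap) : pvCeil cap 0 = 0 := by
  apply pvCeil_of_bracket cap 0 0 hc <;> nlinarith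

theorem pvCeil_add_cap (cap x : Int) (hc : 1 ≤ cap) :
    pvCeil cap (x + cap) = pvCeil cap x + 1 := by
  obtain ⟨h1, h2⟩ := pvCeil_bracket cap x hc
  apply pvCeil_of_bracket cap _ _ hc <;> nlinarith

theorem pvCeil_eq_one (cap x : Int) (hc : 1 ≤ cap) (h0 : 0 < x) (h1 : x ≤ cap) :
    pvCeil cap x = 1 := by
  apply pvCeil_of_bracket cap _ _ hc <;> nlinarith

theorem pvCeil_nonneg (cap x : Int) (hc : 1 ≤ cap) (h0 : 0 ≤ x) : 0 ≤ pvCeil cap x := by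
  obtain ⟨h1, h2⟩ := pvCeil_bracket cap x hc
  nlinarith

theorem pvCeil_pos (cap x : Int) (hc : 1 ≤ cap) (h0 : 0 < x) : 1 ≤ pvCeil cap x := by
  obtain ⟨h1, h2⟩ := pvCeil_bracket cap x hc
  nlinarith

theorem pvS_empty (xs : List Int) (a b : Int) (h : b < a) : pvS xs a b = 0 := by
  unfold pvS
  have : (b + 1 - a).toNat = 0 := by omega
  rw [this]
  simp

theorem pvS_top (xs : List Int) (a b : Int) (h : a ≤ b) :
    pvS xs a b = pvS xs a (b - 1) + PySem.List.pyGetD xs b 0 := by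
  unfold pvS
  have h1 : (b + 1 - a).toNat = (b - 1 + 1 - a).toNat + 1 := by omega
  rw [h1, Finset.sum_range_succ]
  have h2 : a + ((b - 1 + 1 - a).toNat : Int) = b := by omega
  rw [h2]

theorem pvS_bot (xs : List Int) (a b : Int) (h : a ≤ b) :
    pvS xs a b = PySem.List.pyGetD xs a 0 + pvS xs (a + 1) b := by
  unfold pvS
  have h1 : (b + 1 - a).toNat = (b + 1 - (a + 1)).toNat + 1 := by omega
  rw [h1, Finset.sum_range_succ']
  have h2 : ∀ k : Nat, a + ((k : Int) + 1) = a + 1 + k := by intro k; omega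
  simp only [Nat.cast_add, Nat.cast_one, h2]
  simp [add_comm]

theorem pvT_nonneg (cap : Int) (d p : List Int) (i : Int) : 0 ≤ pvT cap d p i := by
  unfold pvT
  exact Finset.sum_nonneg fun j _ => le_max_left _ _

theorem pvSkip_spec (d p : List Int) (i : Int) :
    pvSkip d p i ≤ i ∧ (-1 ≤ i → -1 ≤ pvSkip d p i) ∧ (i < 0 → pvSkip d p i = i) ∧
    (∀ k : Int, pvSkip d p i < k → k ≤ i →
      PySem.List.pyGetD d k 0 = 0 ∧ PySem.List.pyGetD p k 0 = 0) ∧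
    (0 ≤ pvSkip d p i →
      ¬(PySem.List.pyGetD d (pvSkip d p i) 0 = 0 ∧ PySem.List.pyGetD p (pvSkip d p i) 0 = 0)) := by
  fun_induction pvSkip d p i with
  | case1 i h ih =>
    obtain ⟨ih1, ih2, ih3, ih4, ih5⟩ := ih
    refine ⟨by omega, fun _ => ih2 (by omega), by omega, ?_, ih5⟩
    intro k hk1 hk2
    rcases lt_or_eq_of_le hk2 with hlt | heq
    · exact ih4 k hk1 (by omega)
    · subst heq; exact ⟨h.2.1, h.2.2⟩
  | case2 i h =>
    push Not at h
    refine ⟨le_refl _, fun hh => hh, fun _ => rfl, by omega, ?_⟩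
    intro h0 ⟨hd0, hp0⟩
    exact absurd (h h0 hd0) (by simp [hp0])

theorem pvT_neg (cap : Int) (d p : List Int) (i : Int) (h : i < 0) : pvT cap d p i = 0 := by
  unfold pvT
  have : (i + 1).toNat = 0 := by omega
  rw [this]
  simp

theorem pvS_nonneg (xs : List Int) (a b : Int)
    (h : ∀ k : Int, a ≤ k → k ≤ b → 0 ≤ PySem.List.pyGetD xs k 0) : 0 ≤ pvS xs a b := by
  unfold pvS
  refine Finset.sum_nonneg fun k hk => ?_
  simp only [Finset.mem_range] at hk
  exact h (a + k) (by omega) (by omega)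

theorem pvS_split (xs : List Int) (a m b : Int) (h1 : a ≤ m) (h2 : m ≤ b + 1) :
    pvS xs a b = pvS xs a (m - 1) + pvS xs m b := by
  have hgen : ∀ (nn : Nat) (b : Int), m ≤ b + 1 → (b + 1 - m).toNat = nn →
      pvS xs a b = pvS xs a (m - 1) + pvS xs m b := by
    intro nn
    induction nn with
    | zero =>
      intro b hb hnn
      have hbm : b = m - 1 := by omega
      subst hbm
      rw [pvS_empty xs m (m - 1) (by omega)]
      ring
    | succ k ih =>
      intro b hb hnn
      have hmb : m ≤ b := by omega
      rw [pvS_top xs a b (by omega), ih (b - 1) (by omega) (by omega),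
        pvS_top xs m b (by omega)]
      ring
  exact hgen (b + 1 - m).toNat b h2 rfl

theorem pvSubAt_length (xs : List Int) (i x : Int) :
    (pvSubAt xs i x).length = xs.length := by
  unfold pvSubAt
  exact PySem.List.length_pySetD xs i _

theorem pvSubAt_get (xs : List Int) (i x k : Int) (hi : 0 ≤ i) (hil : i < (xs.length : Int))
    (hk : 0 ≤ k) :
    PySem.List.pyGetD (pvSubAt xs i x) k 0 =
      if k = i then PySem.List.pyGetD xs i 0 - x else PySem.List.pyGetD xs k 0 := by
  unfold pvSubAt
  rw [PySem.List.pySetD_of_nonneg xs _ hi, PySem.List.pyGetD_of_nonneg _ _ hk,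
    PySem.List.pyGetD_of_nonneg xs _ hk, PySem.List.pyGetD_of_nonneg xs _ hi]
  by_cases heq : k = i
  · subst heq
    rw [if_pos rfl]
    have hlt : k.toNat < xs.length := by omega
    simp [List.getD, hlt]
  · rw [if_neg heq]
    have hne : i.toNat ≠ k.toNat := by omega
    simp [List.getD, hne]

theorem pvS_SubAt_lower (xs : List Int) (i x a b : Int) (hi : 0 ≤ i)
    (hil : i < (xs.length : Int)) (ha : 0 ≤ a) (hb : b < i) :
    pvS (pvSubAt xs i x) a b = pvS xs a b := by
  unfold pvS
  refine Finset.sum_congr rfl fun k hk => ?_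
  simp only [Finset.mem_range] at hk
  rw [pvSubAt_get xs i x (a + k) hi hil (by omega), if_neg (by omega)]

theorem pvN_one (cap : Int) (hc : 1 ≤ cap) (x y : Int) (hb1 : x ≤ cap) (hb2 : y ≤ cap)
    (hpos : 0 < x ∨ 0 < y) : max 0 (pvCeil cap (max x y)) = 1 := by
  rw [pvCeil_eq_one cap (max x y) hc (by omega) (by omega)]
  omega

theorem pvT_step_zero (cap : Int) (hc : 1 ≤ cap) (d p : List Int) (i : Int) (hi : 0 ≤ i)
    (hd : PySem.List.pyGetD d i 0 = 0) (hp : PySem.List.pyGetD p i 0 = 0) :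
    pvT cap d p i = pvT cap d p (i - 1) := by
  unfold pvT
  have h1 : (i + 1).toNat = (i - 1 + 1).toNat + 1 := by omega
  rw [h1, Finset.sum_range_succ]
  have htopc : (((i - 1 + 1).toNat : Nat) : Int) = i := by omega
  have hlast : max 0 (pvCeil cap (max (pvS d ((i - 1 + 1).toNat : Int) i)
      (pvS p ((i - 1 + 1).toNat : Int) i))) = 0 := by
    rw [htopc, pvS_top d i i le_rfl, pvS_empty d i (i - 1) (by omega), hd,
      pvS_top p i i le_rfl, pvS_empty p i (i - 1) (by omega), hp]
    norm_num [pvCeil_zero cap hc]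
  rw [hlast, add_zero]
  refine Finset.sum_congr rfl fun j hj => ?_
  simp only [Finset.mem_range] at hj
  have hji : (j : Int) ≤ i - 1 := by omega
  rw [pvS_top d j i (by omega), pvS_top p j i (by omega), hd, hp, add_zero, add_zero]

theorem pvSkip_T (cap : Int) (hc : 1 ≤ cap) (d p : List Int) (i : Int) :
    pvT cap d p (pvSkip d p i) = pvT cap d p i := by
  fun_induction pvSkip d p i with
  | case1 i h ih =>
    rw [ih, ← pvT_step_zero cap hc d p i h.1 h.2.1 h.2.2]
  | case2 i h => rfl

theorem pvTake_spec (cap : Int) (d p : List Int) (i dcnt pcnt : Int) :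
    (pvTake cap d p i dcnt pcnt).1 ≤ i ∧
    (-1 ≤ i → -1 ≤ (pvTake cap d p i dcnt pcnt).1) ∧
    (pvTake cap d p i dcnt pcnt).2.1 = dcnt + pvS d ((pvTake cap d p i dcnt pcnt).1 + 1) i ∧
    (pvTake cap d p i dcnt pcnt).2.2 = pcnt + pvS p ((pvTake cap d p i dcnt pcnt).1 + 1) i ∧
    (∀ m : Int, (pvTake cap d p i dcnt pcnt).1 < m → m ≤ i →
      dcnt + pvS d m i ≤ cap ∧ pcnt + pvS p m i ≤ cap) ∧
    (0 ≤ (pvTake cap d p i dcnt pcnt).1 →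
      cap < (pvTake cap d p i dcnt pcnt).2.1 +
          PySem.List.pyGetD d (pvTake cap d p i dcnt pcnt).1 0 ∨
      cap < (pvTake cap d p i dcnt pcnt).2.2 +
          PySem.List.pyGetD p (pvTake cap d p i dcnt pcnt).1 0) := by
  fun_induction pvTake cap d p i dcnt pcnt with
  | case1 i dcnt pcnt hi hbr =>
    refine ⟨le_refl _, fun _ => by omega, ?_, ?_, ?_, ?_⟩
    · rw [pvS_empty d (i + 1) i (by omega)]; ring
    · rw [pvS_empty p (i + 1) i (by omega)]; ring
    · intro m h1 h2; omega
    · intro _; omega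
  | case2 i dcnt pcnt hi hbr ih =>
    obtain ⟨ih1, ih2, ih3, ih4, ih5, ih6⟩ := ih
    push Not at hbr
    refine ⟨by omega, fun _ => by omega, ?_, ?_, ?_, ih6⟩
    · rw [ih3, pvS_top d _ i (by omega)]; ring
    · rw [ih4, pvS_top p _ i (by omega)]; ring
    · intro m h1 h2
      rcases lt_or_eq_of_le h2 with hlt | heq
      · have := ih5 m h1 (by omega)
        rw [pvS_top d m i (by omega), pvS_top p m i (by omega)]
        omega
      · rw [heq, pvS_top d i i le_rfl, pvS_empty d i (i - 1) (by omega),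
          pvS_top p i i le_rfl, pvS_empty p i (i - 1) (by omega)]
        omega
  | case3 i dcnt pcnt hi =>
    refine ⟨le_refl _, fun h => by omega, ?_, ?_, ?_, fun h => by omega⟩
    · rw [pvS_empty d (i + 1) i (by omega)]; ring
    · rw [pvS_empty p (i + 1) i (by omega)]; ring
    · intro m h1 h2; omega

theorem pvTrip (cap : Int) (hc : 1 ≤ cap) (d p : List Int) (i1 i2 dc pc : Int)
    (hi1 : 0 ≤ i1) (hld : i1 < (d.length : Int)) (hlp : i1 < (p.length : Int))
    (hbelow : ∀ k : Int, 0 ≤ k → k < i1 →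
      0 ≤ PySem.List.pyGetD d k 0 ∧ 0 ≤ PySem.List.pyGetD p k 0)
    (htop : 0 < PySem.List.pyGetD d i1 0 ∨ 0 < PySem.List.pyGetD p i1 0)
    (htk : pvTake cap d p i1 0 0 = (i2, dc, pc)) :
    pvT cap d p i1 = (i1 + 1) + pvT cap (pvSubAt d i2 (cap - dc)) (pvSubAt p i2 (cap - pc)) i2 ∧
    (0 ≤ i2 → 0 < PySem.List.pyGetD (pvSubAt d i2 (cap - dc)) i2 0 ∨
              0 < PySem.List.pyGetD (pvSubAt p i2 (cap - pc)) i2 0) := by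
  obtain ⟨t1, t2, t3, t4, t5, t6⟩ := pvTake_spec cap d p i1 0 0
  rw [htk] at t1 t2 t3 t4 t5 t6
  dsimp only at t1 t2 t3 t4 t5 t6
  simp only [zero_add] at t3 t4 t5
  have hi2m : -1 ≤ i2 := t2 (by omega)
  -- every position j with i2 < j ≤ i1 contributes exactly one trip
  have hone : ∀ j : Int, 0 ≤ j → i2 < j → j ≤ i1 →
      max 0 (pvCeil cap (max (pvS d j i1) (pvS p j i1))) = 1 := by
    intro j hj0 hji2 hji1
    have hb := t5 j hji2 hji1
    have hlow : 0 ≤ pvS d j (i1 - 1) ∧ 0 ≤ pvS p j (i1 - 1) := by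
      constructor <;>
        exact pvS_nonneg _ j (i1 - 1) fun k hk1 hk2 => by
          have := hbelow k (by omega) (by omega); omega
    have hsd : pvS d j i1 = pvS d j (i1 - 1) + PySem.List.pyGetD d i1 0 :=
      pvS_top d j i1 (by omega)
    have hsp : pvS p j i1 = pvS p j (i1 - 1) + PySem.List.pyGetD p i1 0 :=
      pvS_top p j i1 (by omega)
    refine pvN_one cap hc _ _ (by omega) (by omega) ?_
    rcases htop with hd1 | hp1
    · left; omega
    · right; omega
  by_cases hi2 : 0 ≤ i2
  · -- the truck broke off at position i2; each suffix sum below loses exactly cap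
    have hstop := t6 hi2
    set d' := pvSubAt d i2 (cap - dc) with hd'
    set p' := pvSubAt p i2 (cap - pc) with hp'
    have hgd' : PySem.List.pyGetD d' i2 0 = PySem.List.pyGetD d i2 0 - (cap - dc) := by
      rw [hd', pvSubAt_get d i2 _ i2 hi2 (by omega) hi2, if_pos rfl]
    have hgp' : PySem.List.pyGetD p' i2 0 = PySem.List.pyGetD p i2 0 - (cap - pc) := by
      rw [hp', pvSubAt_get p i2 _ i2 hi2 (by omega) hi2, if_pos rfl]
    have hnewtop : 0 < PySem.List.pyGetD d' i2 0 ∨ 0 < PySem.List.pyGetD p' i2 0 := by omega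
    refine ⟨?_, fun _ => hnewtop⟩
    have hlow' : ∀ j : Int, 0 ≤ j →
        pvS d' j (i2 - 1) = pvS d j (i2 - 1) ∧ pvS p' j (i2 - 1) = pvS p j (i2 - 1) := by
      intro j hj
      exact ⟨pvS_SubAt_lower d i2 _ j (i2 - 1) hi2 (by omega) hj (by omega),
             pvS_SubAt_lower p i2 _ j (i2 - 1) hi2 (by omega) hj (by omega)⟩
    -- suffix-sum shift by cap
    have hshift : ∀ j : Int, 0 ≤ j → j ≤ i2 →
        pvS d j i1 = pvS d' j i2 + cap ∧ pvS p j i1 = pvS p' j i2 + cap := by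
      intro j hj0 hji2
      obtain ⟨hl1, hl2⟩ := hlow' j hj0
      constructor
      · rw [pvS_split d j (i2 + 1) i1 (by omega) (by omega), ← t3,
          pvS_top d' j i2 (by omega), hl1, hgd',
          show i2 + 1 - 1 = i2 from by omega, pvS_top d j i2 (by omega)]
        ring
      · rw [pvS_split p j (i2 + 1) i1 (by omega) (by omega), ← t4,
          pvS_top p' j i2 (by omega), hl2, hgp',
          show i2 + 1 - 1 = i2 from by omega, pvS_top p j i2 (by omega)]
        ring
    -- positivity of the new state's suffix maxima
    have hpos' : ∀ j : Int, 0 ≤ j → j ≤ i2 → 0 < max (pvS d' j i2) (pvS p' j i2) := by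
      intro j hj0 hji2
      obtain ⟨hl1, hl2⟩ := hlow' j hj0
      have hnn : 0 ≤ pvS d j (i2 - 1) ∧ 0 ≤ pvS p j (i2 - 1) := by
        constructor <;>
          exact pvS_nonneg _ j (i2 - 1) fun k hk1 hk2 => by
            have := hbelow k (by omega) (by omega); omega
      have e1 : pvS d' j i2 = pvS d' j (i2 - 1) + PySem.List.pyGetD d' i2 0 :=
        pvS_top d' j i2 (by omega)
      have e2 : pvS p' j i2 = pvS p' j (i2 - 1) + PySem.List.pyGetD p' i2 0 :=
        pvS_top p' j i2 (by omega)
      omega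
    -- split the sum
    unfold pvT
    have hm : (i2 + 1).toNat ≤ (i1 + 1).toNat := by omega
    rw [Finset.range_eq_Ico, ← Finset.sum_Ico_consecutive _ (Nat.zero_le (i2 + 1).toNat) hm]
    have hupper : ∑ j ∈ Finset.Ico (i2 + 1).toNat (i1 + 1).toNat,
        max 0 (pvCeil cap (max (pvS d (j : Int) i1) (pvS p (j : Int) i1))) =
        ((i1 + 1).toNat - (i2 + 1).toNat : Nat) := by
      rw [Finset.sum_congr rfl fun j hj => by
        simp only [Finset.mem_Ico] at hj
        exact hone j (by omega) (by omega) (by omega)]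
      simp [Nat.card_Ico]
    have hlower : ∑ j ∈ Finset.Ico 0 (i2 + 1).toNat,
        max 0 (pvCeil cap (max (pvS d (j : Int) i1) (pvS p (j : Int) i1))) =
        (∑ j ∈ Finset.range (i2 + 1).toNat,
          max 0 (pvCeil cap (max (pvS d' (j : Int) i2) (pvS p' (j : Int) i2)))) +
        ((i2 + 1).toNat : Int) := by
      rw [← Finset.range_eq_Ico]
      have hterm : ∀ j ∈ Finset.range (i2 + 1).toNat,
          max 0 (pvCeil cap (max (pvS d (j : Int) i1) (pvS p (j : Int) i1))) =
          max 0 (pvCeil cap (max (pvS d' (j : Int) i2) (pvS p' (j : Int) i2))) + 1 := by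
        intro j hj
        simp only [Finset.mem_range] at hj
        obtain ⟨e1, e2⟩ := hshift j (by omega) (by omega)
        have hp1 := hpos' j (by omega) (by omega)
        have hq := pvCeil_pos cap _ hc hp1
        have hmx : max (pvS d (j : Int) i1) (pvS p (j : Int) i1) =
            max (pvS d' (j : Int) i2) (pvS p' (j : Int) i2) + cap := by omega
        have e3 : pvCeil cap (max (pvS d (j : Int) i1) (pvS p (j : Int) i1)) =
            pvCeil cap (max (pvS d' (j : Int) i2) (pvS p' (j : Int) i2)) + 1 := by
          rw [hmx]; exact pvCeil_add_cap cap _ hc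
        omega
      rw [Finset.sum_congr rfl hterm, Finset.sum_add_distrib]
      simp
    rw [hupper, hlower]
    simp only [Finset.range_eq_Ico]
    omega
  · -- everything was delivered: i2 = -1 and the whole sum collapses to i1 + 1
    have hi2e : i2 = -1 := by omega
    subst hi2e
    rw [pvT_neg cap _ _ (-1) (by omega)]
    unfold pvT
    rw [Finset.sum_congr rfl fun j hj => by
      simp only [Finset.mem_range] at hj
      exact hone j (by omega) (by omega) (by omega)]
    simp
    omega

theorem pvOuter_neg (cap : Int) (fuel : Nat) (i : Int) (d p : List Int) (acc : Int)
    (h : i < 0) : pvOuter cap fuel i d p acc = acc := by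
  cases fuel with
  | zero => rfl
  | succ fuel => simp only [pvOuter, if_neg (by omega : ¬ 0 ≤ i)]

theorem pvOuter_eq (cap : Int) (hc : 1 ≤ cap) :
    ∀ (fuel : Nat) (i : Int) (d p : List Int) (acc : Int),
    i < (d.length : Int) → i < (p.length : Int) →
    (∀ k : Int, 0 ≤ k → k < i → 0 ≤ PySem.List.pyGetD d k 0 ∧ 0 ≤ PySem.List.pyGetD p k 0) →
    (0 ≤ i → (0 ≤ PySem.List.pyGetD d i 0 ∧ 0 ≤ PySem.List.pyGetD p i 0) ∨
      (0 < PySem.List.pyGetD d i 0 ∨ 0 < PySem.List.pyGetD p i 0)) →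
    pvT cap d p i < (fuel : Int) →
    pvOuter cap fuel i d p acc = acc + 2 * pvT cap d p i := by
  intro fuel
  induction fuel with
  | zero =>
    intro i d p acc _ _ _ _ hfuel
    have := pvT_nonneg cap d p i
    norm_num at hfuel
    omega
  | succ fuel ih =>
    intro i d p acc hld hlp hbelow htop hfuel
    by_cases hi : 0 ≤ i
    · simp only [pvOuter, if_pos hi]
      obtain ⟨s1, s2, s3, s4, s5⟩ := pvSkip_spec d p i
      set i1 := pvSkip d p i with hi1def
      have hsT : pvT cap d p i1 = pvT cap d p i := pvSkip_T cap hc d p i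
      have hi1m : -1 ≤ i1 := s2 (by omega)
      by_cases hi1 : 0 ≤ i1
      · -- there is work at position i1
        have htop1 : 0 < PySem.List.pyGetD d i1 0 ∨ 0 < PySem.List.pyGetD p i1 0 := by
          have hnz := s5 hi1
          rcases lt_or_eq_of_le s1 with hlt | heq
          · have := hbelow i1 hi1 hlt
            omega
          · rw [heq] at hnz ⊢
            rcases htop hi with hcase | hcase
            · omega
            · exact hcase
        rcases htk : pvTake cap d p i1 0 0 with ⟨i2, dc, pc⟩
        obtain ⟨htrip, hnewtop⟩ := pvTrip cap hc d p i1 i2 dc pc hi1 (by omega) (by omega)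
          (fun k hk1 hk2 => hbelow k hk1 (by omega)) htop1 htk
        have ht2 := (pvTake_spec cap d p i1 0 0).1
        rw [htk] at ht2
        by_cases hi2 : 0 ≤ i2
        · rw [ih i2 (pvSubAt d i2 (cap - dc)) (pvSubAt p i2 (cap - pc)) (acc + (i1 + 1) * 2)
            (by rw [pvSubAt_length]; omega) (by rw [pvSubAt_length]; omega)
            (fun k hk1 hk2 => by
              rw [pvSubAt_get d i2 _ k hi2 (by omega) hk1, if_neg (by omega),
                pvSubAt_get p i2 _ k hi2 (by omega) hk1, if_neg (by omega)]
              exact hbelow k hk1 (by omega))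
            (fun _ => Or.inr (hnewtop hi2))
            (by omega)]
          omega
        · rw [pvOuter_neg cap fuel i2 _ _ _ (by omega)]
          have hT2 : pvT cap (pvSubAt d i2 (cap - dc)) (pvSubAt p i2 (cap - pc)) i2 = 0 :=
            pvT_neg cap _ _ i2 (by omega)
          omega
      · -- nothing left to do: i1 = -1, this is the last (empty) round
        have hi1e : i1 = -1 := by omega
        have hT0 : pvT cap d p i = 0 := by
          rw [← hsT, hi1e, pvT_neg cap d p (-1) (by omega)]
        have htk : pvTake cap d p i1 0 0 = (i1, 0, 0) := by
          rw [hi1e]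
          rw [pvTake]
          simp
        rw [htk]
        rw [pvOuter_neg cap fuel _ _ _ _ (by simp [hi1e])]
        rw [hT0, hi1e]
        ring
    · rw [pvOuter_neg cap _ i d p acc (by omega), pvT_neg cap d p i (by omega)]
      ring

theorem pvPre_get (xs : List Int) (n : Int) (hlen : n ≤ (xs.length : Int))
    (h : ∀ x ∈ xs.take n.toNat, 0 ≤ x) (k : Int) (hk0 : 0 ≤ k) (hk : k < n) :
    0 ≤ PySem.List.pyGetD xs k 0 := by
  rw [PySem.List.pyGetD_of_nonneg xs 0 hk0]
  have hkl : k.toNat < xs.length := by omega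
  have hkn : k.toNat < n.toNat := by omega
  have hmem : xs.getD k.toNat 0 ∈ xs.take n.toNat := by
    rw [List.getD_eq_getElem xs 0 hkl]
    have hlt : k.toNat < (xs.take n.toNat).length := by
      simp [List.length_take]; omega
    have : (xs.take n.toNat)[k.toNat]'hlt = xs[k.toNat]'hkl := List.getElem_take
    rw [← this]
    exact List.getElem_mem hlt
  exact h _ hmem

theorem pvCeil_add_mul (cap x t : Int) (hc : 1 ≤ cap) :
    pvCeil cap (x + t * cap) = pvCeil cap x + t := by
  obtain ⟨h1, h2⟩ := pvCeil_bracket cap x hc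
  apply pvCeil_of_bracket cap _ _ hc <;> nlinarith

theorem pvCeil_mono (cap a b : Int) (hc : 1 ≤ cap) (h : a ≤ b) :
    pvCeil cap a ≤ pvCeil cap b := by
  obtain ⟨h1, h2⟩ := pvCeil_bracket cap a hc
  obtain ⟨h3, h4⟩ := pvCeil_bracket cap b hc
  nlinarith

theorem pvCeil_max (cap a b : Int) (hc : 1 ≤ cap) :
    pvCeil cap (max a b) = max (pvCeil cap a) (pvCeil cap b) := by
  rcases le_total a b with h | h
  · rw [max_eq_right h, max_eq_right (pvCeil_mono cap a b hc h)]
  · rw [max_eq_left h, max_eq_left (pvCeil_mono cap b a hc h)]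

theorem pvCeil_ge_two (cap x : Int) (hc : 1 ≤ cap) (h : cap < x) : 2 ≤ pvCeil cap x := by
  obtain ⟨h1, h2⟩ := pvCeil_bracket cap x hc
  nlinarith

-- the trips still owed for positions below k (N_j for j in [k+1, top])
def pvW (cap : Int) (d p : List Int) (top k : Int) : Int :=
  ∑ j ∈ Finset.Ico (k + 1).toNat (top + 1).toNat,
    max 0 (pvCeil cap (max (pvS d (j : Int) top) (pvS p (j : Int) top)))

theorem pvW_top (cap : Int) (d p : List Int) (top : Int) : pvW cap d p top top = 0 := by
  unfold pvW
  rw [Finset.Ico_self]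
  simp

theorem pvW_neg_one (cap : Int) (d p : List Int) (top : Int) :
    pvW cap d p top (-1) = pvT cap d p top := by
  unfold pvW pvT
  rw [Finset.range_eq_Ico]
  norm_num

theorem pvW_step (cap : Int) (d p : List Int) (top k : Int) (h0 : 0 ≤ k) (h1 : k ≤ top) :
    pvW cap d p top (k - 1) =
      max 0 (pvCeil cap (max (pvS d k top) (pvS p k top))) + pvW cap d p top k := by
  unfold pvW
  rw [show (k - 1 + 1).toNat = k.toNat from by omega,
    Finset.sum_eq_sum_Ico_succ_bot (by omega : k.toNat < (top + 1).toNat),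
    show k.toNat + 1 = (k + 1).toNat from by omega,
    show ((k.toNat : Nat) : Int) = k from by omega]

-- one step of B's loop preserves the loop invariant
theorem pvStep_inv (cap : Int) (hc : 1 ≤ cap) (d p : List Int) (top k : Int)
    (hk0 : 0 ≤ k) (hktop : k ≤ top)
    (hnn : ∀ j : Int, 0 ≤ j → j ≤ top →
      0 ≤ PySem.List.pyGetD d j 0 ∧ 0 ≤ PySem.List.pyGetD p j 0)
    (result : Int) (opened : Bool) (dc pc : Int)
    (hres : result = 2 * (pvW cap d p top k +
      (k + 1) * pvCeil cap (max (pvS d (k + 1) top) (pvS p (k + 1) top))))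
    (hop : opened = true →
      dc = pvS d (k + 1) top -
        (pvCeil cap (max (pvS d (k + 1) top) (pvS p (k + 1) top)) - 1) * cap ∧
      pc = pvS p (k + 1) top -
        (pvCeil cap (max (pvS d (k + 1) top) (pvS p (k + 1) top)) - 1) * cap ∧
      dc ≤ cap ∧ pc ≤ cap ∧ (0 < dc ∨ 0 < pc) ∧
      1 ≤ pvCeil cap (max (pvS d (k + 1) top) (pvS p (k + 1) top)))
    (hcl : opened = false →
      pvS d (k + 1) top = pvCeil cap (max (pvS d (k + 1) top) (pvS p (k + 1) top)) * cap ∧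
      pvS p (k + 1) top = pvCeil cap (max (pvS d (k + 1) top) (pvS p (k + 1) top)) * cap ∧
      dc = 0 ∧ pc = 0) :
    (pvStep cap d p (result, opened, dc, pc) k).1 = 2 * (pvW cap d p top (k - 1) +
      k * pvCeil cap (max (pvS d k top) (pvS p k top))) ∧
    ((pvStep cap d p (result, opened, dc, pc) k).2.1 = true →
      (pvStep cap d p (result, opened, dc, pc) k).2.2.1 = pvS d k top -
        (pvCeil cap (max (pvS d k top) (pvS p k top)) - 1) * cap ∧
      (pvStep cap d p (result, opened, dc, pc) k).2.2.2 = pvS p k top -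
        (pvCeil cap (max (pvS d k top) (pvS p k top)) - 1) * cap ∧
      (pvStep cap d p (result, opened, dc, pc) k).2.2.1 ≤ cap ∧
      (pvStep cap d p (result, opened, dc, pc) k).2.2.2 ≤ cap ∧
      (0 < (pvStep cap d p (result, opened, dc, pc) k).2.2.1 ∨
        0 < (pvStep cap d p (result, opened, dc, pc) k).2.2.2) ∧
      1 ≤ pvCeil cap (max (pvS d k top) (pvS p k top))) ∧
    ((pvStep cap d p (result, opened, dc, pc) k).2.1 = false →
      pvS d k top = pvCeil cap (max (pvS d k top) (pvS p k top)) * cap ∧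
      pvS p k top = pvCeil cap (max (pvS d k top) (pvS p k top)) * cap ∧
      (pvStep cap d p (result, opened, dc, pc) k).2.2.1 = 0 ∧
      (pvStep cap d p (result, opened, dc, pc) k).2.2.2 = 0) := by
  have hdv0 : 0 ≤ PySem.List.pyGetD d k 0 := (hnn k hk0 hktop).1
  have hpv0 : 0 ≤ PySem.List.pyGetD p k 0 := (hnn k hk0 hktop).2
  have hSnn : 0 ≤ pvS d (k + 1) top :=
    pvS_nonneg d (k + 1) top fun j h1 h2 => (hnn j (by omega) (by omega)).1
  have hPnn : 0 ≤ pvS p (k + 1) top :=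
    pvS_nonneg p (k + 1) top fun j h1 h2 => (hnn j (by omega) (by omega)).2
  have hSd : pvS d k top = PySem.List.pyGetD d k 0 + pvS d (k + 1) top :=
    pvS_bot d k top (by omega)
  have hSp : pvS p k top = PySem.List.pyGetD p k 0 + pvS p (k + 1) top :=
    pvS_bot p k top (by omega)
  by_cases hskip : opened = false ∧ PySem.List.pyGetD d k 0 = 0 ∧ PySem.List.pyGetD p k 0 = 0
  · -- untouched house before the first trip opens: state is unchanged
    obtain ⟨hS0, hP0, hdc0, hpc0⟩ := hcl hskip.1
    have hstep : pvStep cap d p (result, opened, dc, pc) k = (result, opened, dc, pc) := by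
      unfold pvStep
      rw [if_pos ⟨hskip.1, hskip.2.1, hskip.2.2⟩]
    have hSe : pvS d k top = pvS d (k + 1) top := by rw [hSd, hskip.2.1]; ring
    have hPe : pvS p k top = pvS p (k + 1) top := by rw [hSp, hskip.2.2]; ring
    rw [hstep, hSe, hPe]
    have hTnn : 0 ≤ pvCeil cap (max (pvS d (k + 1) top) (pvS p (k + 1) top)) :=
      pvCeil_nonneg cap _ hc (by omega)
    refine ⟨?_, fun h => absurd h (by simp [hskip.1]), fun _ => ⟨hS0, hP0, hdc0, hpc0⟩⟩
    rw [pvW_step cap d p top k hk0 hktop, hSe, hPe, hres,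
      show max 0 (pvCeil cap (max (pvS d (k + 1) top) (pvS p (k + 1) top))) =
        pvCeil cap (max (pvS d (k + 1) top) (pvS p (k + 1) top)) from by omega]
    ring
  · -- a trip is (or becomes) open at k: C closed trips so far, dc/pc loaded in the open one
    obtain ⟨C, hC0, hdcx, hpcx, hdle, hple, hpos5, hres1⟩ :
        ∃ C : Int, 0 ≤ C ∧ dc = pvS d (k + 1) top - C * cap ∧
          pc = pvS p (k + 1) top - C * cap ∧ dc ≤ cap ∧ pc ≤ cap ∧
          (0 < dc + PySem.List.pyGetD d k 0 ∨ 0 < pc + PySem.List.pyGetD p k 0) ∧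
          (if opened = true then result else result + 2 * (k + 1)) =
            2 * (pvW cap d p top k + (k + 1) * (C + 1)) := by
      cases opened with
      | true =>
        obtain ⟨h1, h2, h3, h4, h5, h6⟩ := hop rfl
        exact ⟨pvCeil cap (max (pvS d (k + 1) top) (pvS p (k + 1) top)) - 1, by omega,
          by omega, by omega, h3, h4, by omega, by rw [if_pos rfl, hres]; ring⟩
      | false =>
        obtain ⟨h1, h2, h3, h4⟩ := hcl rfl
        have hTnn : 0 ≤ pvCeil cap (max (pvS d (k + 1) top) (pvS p (k + 1) top)) :=
          pvCeil_nonneg cap _ hc (by omega)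
        refine ⟨pvCeil cap (max (pvS d (k + 1) top) (pvS p (k + 1) top)), hTnn,
          by omega, by omega, by omega, by omega, ?_, by rw [if_neg (by exact Bool.false_ne_true), hres]; ring⟩
        have : ¬(PySem.List.pyGetD d k 0 = 0 ∧ PySem.List.pyGetD p k 0 = 0) := by
          intro hzz; exact hskip ⟨rfl, hzz.1, hzz.2⟩
        omega
    have hSd' : pvS d k top = (dc + PySem.List.pyGetD d k 0) + C * cap := by
      rw [hSd]; omega
    have hSp' : pvS p k top = (pc + PySem.List.pyGetD p k 0) + C * cap := by
      rw [hSp]; omega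
    have hmaxeq : max (pvS d k top) (pvS p k top) =
        max (dc + PySem.List.pyGetD d k 0) (pc + PySem.List.pyGetD p k 0) + C * cap := by
      rw [hSd', hSp', max_add_add_right]
    have hT' : pvCeil cap (max (pvS d k top) (pvS p k top)) =
        pvCeil cap (max (dc + PySem.List.pyGetD d k 0) (pc + PySem.List.pyGetD p k 0)) + C := by
      rw [hmaxeq, pvCeil_add_mul cap _ C hc]
    by_cases hclose : cap < dc + PySem.List.pyGetD d k 0 ∨ cap < pc + PySem.List.pyGetD p k 0
    · -- the load would overflow: close the trip (and batch further full-capacity trips)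
      have hMX : cap < max (dc + PySem.List.pyGetD d k 0) (pc + PySem.List.pyGetD p k 0) := by
        omega
      have hQ2 : 2 ≤ pvCeil cap
          (max (dc + PySem.List.pyGetD d k 0) (pc + PySem.List.pyGetD p k 0)) :=
        pvCeil_ge_two cap _ hc hMX
      have hbr := pvCeil_bracket cap
        (max (dc + PySem.List.pyGetD d k 0) (pc + PySem.List.pyGetD p k 0)) hc
      have htval : max 0 (max
          (pvCeil cap (PySem.List.pyGetD d k 0 - (cap - dc) - cap))
          (pvCeil cap (PySem.List.pyGetD p k 0 - (cap - pc) - cap))) =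
          pvCeil cap (max (dc + PySem.List.pyGetD d k 0) (pc + PySem.List.pyGetD p k 0)) - 2 := by
        have e1 : PySem.List.pyGetD d k 0 - (cap - dc) - cap =
            (dc + PySem.List.pyGetD d k 0) + (-2) * cap := by ring
        have e2 : PySem.List.pyGetD p k 0 - (cap - pc) - cap =
            (pc + PySem.List.pyGetD p k 0) + (-2) * cap := by ring
        rw [e1, e2, pvCeil_add_mul cap _ _ hc, pvCeil_add_mul cap _ _ hc]
        have hmaxc := pvCeil_max cap (dc + PySem.List.pyGetD d k 0)
          (pc + PySem.List.pyGetD p k 0) hc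
        omega
      have hstep : pvStep cap d p (result, opened, dc, pc) k =
          ((if opened = true then result else result + 2 * (k + 1)) + 2 * (k + 1) *
            ((pvCeil cap (max (dc + PySem.List.pyGetD d k 0)
              (pc + PySem.List.pyGetD p k 0)) - 2) + 1), true,
           PySem.List.pyGetD d k 0 - (cap - dc) - cap *
            (pvCeil cap (max (dc + PySem.List.pyGetD d k 0)
              (pc + PySem.List.pyGetD p k 0)) - 2),
           PySem.List.pyGetD p k 0 - (cap - pc) - cap *
            (pvCeil cap (max (dc + PySem.List.pyGetD d k 0)
              (pc + PySem.List.pyGetD p k 0)) - 2)) := by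
        unfold pvStep
        rw [if_neg hskip]
        dsimp only
        rw [if_pos hclose]
        simp only [show ∀ z : Int, -PySem.Int.floordiv (-z) cap = pvCeil cap z from
          fun z => rfl]
        rw [htval]
      rw [hstep]
      have hQcap : (pvCeil cap (max (dc + PySem.List.pyGetD d k 0)
          (pc + PySem.List.pyGetD p k 0)) - 1) * cap =
          pvCeil cap (max (dc + PySem.List.pyGetD d k 0)
            (pc + PySem.List.pyGetD p k 0)) * cap - cap := by ring
      rw [hQcap] at hbr
      refine ⟨?_, fun _ => ⟨?_, ?_, ?_, ?_, ?_, by omega⟩, fun h => by simp at h⟩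
      · dsimp only
        rw [pvW_step cap d p top k hk0 hktop, hres1, hT',
          max_eq_right (by omega : (0 : Int) ≤ pvCeil cap
            (max (dc + PySem.List.pyGetD d k 0) (pc + PySem.List.pyGetD p k 0)) + C)]
        ring
      · dsimp only
        rw [hT', hSd']
        have : cap * (pvCeil cap (max (dc + PySem.List.pyGetD d k 0)
            (pc + PySem.List.pyGetD p k 0)) - 2) =
            (pvCeil cap (max (dc + PySem.List.pyGetD d k 0)
              (pc + PySem.List.pyGetD p k 0)) - 2) * cap := by ring
        rw [this]
        ring
      · dsimp only
        rw [hT', hSp']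
        have : cap * (pvCeil cap (max (dc + PySem.List.pyGetD d k 0)
            (pc + PySem.List.pyGetD p k 0)) - 2) =
            (pvCeil cap (max (dc + PySem.List.pyGetD d k 0)
              (pc + PySem.List.pyGetD p k 0)) - 2) * cap := by ring
        rw [this]
        ring
      · dsimp only
        have hmul : cap * (pvCeil cap (max (dc + PySem.List.pyGetD d k 0)
            (pc + PySem.List.pyGetD p k 0)) - 2) =
            pvCeil cap (max (dc + PySem.List.pyGetD d k 0)
              (pc + PySem.List.pyGetD p k 0)) * cap - 2 * cap := by ring
        rw [hmul]
        omega
      · dsimp only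
        have hmul : cap * (pvCeil cap (max (dc + PySem.List.pyGetD d k 0)
            (pc + PySem.List.pyGetD p k 0)) - 2) =
            pvCeil cap (max (dc + PySem.List.pyGetD d k 0)
              (pc + PySem.List.pyGetD p k 0)) * cap - 2 * cap := by ring
        rw [hmul]
        omega
      · dsimp only
        have hmul : cap * (pvCeil cap (max (dc + PySem.List.pyGetD d k 0)
            (pc + PySem.List.pyGetD p k 0)) - 2) =
            pvCeil cap (max (dc + PySem.List.pyGetD d k 0)
              (pc + PySem.List.pyGetD p k 0)) * cap - 2 * cap := by ring
        rw [hmul]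
        rcases lt_max_iff.mp hbr.1 with hgt | hgt
        · left; omega
        · right; omega
    · -- the whole house fits in the open trip
      have hfit1 : dc + PySem.List.pyGetD d k 0 ≤ cap := by omega
      have hfit2 : pc + PySem.List.pyGetD p k 0 ≤ cap := by omega
      have hQ1 : pvCeil cap (max (dc + PySem.List.pyGetD d k 0)
          (pc + PySem.List.pyGetD p k 0)) = 1 :=
        pvCeil_eq_one cap _ hc (by omega) (by omega)
      have hstep : pvStep cap d p (result, opened, dc, pc) k =
          ((if opened = true then result else result + 2 * (k + 1)), true,
           dc + PySem.List.pyGetD d k 0, pc + PySem.List.pyGetD p k 0) := by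
        unfold pvStep
        rw [if_neg hskip]
        dsimp only
        rw [if_neg hclose]
      rw [hstep]
      have hTval : pvCeil cap (max (pvS d k top) (pvS p k top)) = C + 1 := by
        rw [hT', hQ1]; ring
      refine ⟨?_, fun _ => ⟨?_, ?_, by simpa using hfit1, by simpa using hfit2,
        by simpa using hpos5, by omega⟩, fun h => by simp at h⟩
      · dsimp only
        rw [pvW_step cap d p top k hk0 hktop, hres1, hTval,
          max_eq_right (by omega : (0 : Int) ≤ C + 1)]
        ring
      · dsimp only
        rw [hTval, hSd']
        ring
      · dsimp only
        rw [hTval, hSp']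
        ring

theorem pvBLoop (cap : Int) (hc : 1 ≤ cap) (d p : List Int) (top : Int)
    (hnn : ∀ j : Int, 0 ≤ j → j ≤ top →
      0 ≤ PySem.List.pyGetD d j 0 ∧ 0 ≤ PySem.List.pyGetD p j 0) :
    ∀ (m : Nat) (k : Int), k = (m : Int) - 1 → k ≤ top →
    ∀ (result : Int) (opened : Bool) (dc pc : Int),
    result = 2 * (pvW cap d p top k +
      (k + 1) * pvCeil cap (max (pvS d (k + 1) top) (pvS p (k + 1) top))) →
    (opened = true →
      dc = pvS d (k + 1) top -
        (pvCeil cap (max (pvS d (k + 1) top) (pvS p (k + 1) top)) - 1) * cap ∧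
      pc = pvS p (k + 1) top -
        (pvCeil cap (max (pvS d (k + 1) top) (pvS p (k + 1) top)) - 1) * cap ∧
      dc ≤ cap ∧ pc ≤ cap ∧ (0 < dc ∨ 0 < pc) ∧
      1 ≤ pvCeil cap (max (pvS d (k + 1) top) (pvS p (k + 1) top))) →
    (opened = false →
      pvS d (k + 1) top = pvCeil cap (max (pvS d (k + 1) top) (pvS p (k + 1) top)) * cap ∧
      pvS p (k + 1) top = pvCeil cap (max (pvS d (k + 1) top) (pvS p (k + 1) top)) * cap ∧
      dc = 0 ∧ pc = 0) →
    ((PySem.List.pyRange k (-1) (-1)).foldl (pvStep cap d p) (result, opened, dc, pc)).1 =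
      2 * pvT cap d p top := by
  intro m
  induction m with
  | zero =>
    intro k hk _ result opened dc pc hres _ _
    have hk1 : k = -1 := by omega
    subst hk1
    rw [PySem.List.pyRange_neg_one_eq_nil (by omega)]
    simp only [List.foldl_nil]
    rw [hres, pvW_neg_one]
    ring
  | succ mk ih =>
    intro k hk hktop result opened dc pc hres hop hcl
    have hk0 : 0 ≤ k := by omega
    rw [PySem.List.pyRange_neg_one_cons (by omega : (-1 : Int) < k)]
    simp only [List.foldl_cons]
    obtain ⟨j1, j2, j3⟩ := pvStep_inv cap hc d p top k hk0 hktop hnn result opened dc pc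
      hres hop hcl
    have heta : pvStep cap d p (result, opened, dc, pc) k =
        ((pvStep cap d p (result, opened, dc, pc) k).1,
         (pvStep cap d p (result, opened, dc, pc) k).2.1,
         (pvStep cap d p (result, opened, dc, pc) k).2.2.1,
         (pvStep cap d p (result, opened, dc, pc) k).2.2.2) := rfl
    rw [heta]
    exact ih (k - 1) (by omega) (by omega) _ _ _ _
      (by rw [show k - 1 + 1 = k from by omega]; exact j1)
      (by rw [show k - 1 + 1 = k from by omega]; exact j2)
      (by rw [show k - 1 + 1 = k from by omega]; exact j3)

theorem solution_alt_eq (cap n : Int) (d p : List Int) (hc : 1 ≤ cap)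
    (hld : n ≤ (d.length : Int)) (hlp : n ≤ (p.length : Int))
    (hd : ∀ x ∈ d.take n.toNat, 0 ≤ x) (hp : ∀ x ∈ p.take n.toNat, 0 ≤ x) :
    solution_alt cap n d p = 2 * pvT cap d p (n - 1) := by
  unfold solution_alt
  by_cases hn : 0 < n
  · have hnn : ∀ j : Int, 0 ≤ j → j ≤ n - 1 →
        0 ≤ PySem.List.pyGetD d j 0 ∧ 0 ≤ PySem.List.pyGetD p j 0 := fun j h1 h2 =>
      ⟨pvPre_get d n hld hd j h1 (by omega), pvPre_get p n hlp hp j h1 (by omega)⟩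
    have hS0 : pvS d (n - 1 + 1) (n - 1) = 0 := pvS_empty d _ _ (by omega)
    have hP0 : pvS p (n - 1 + 1) (n - 1) = 0 := pvS_empty p _ _ (by omega)
    refine pvBLoop cap hc d p (n - 1) hnn n.toNat (n - 1) (by omega) le_rfl 0 false 0 0 ?_
      (by simp) ?_
    · rw [pvW_top, hS0, hP0]
      simp [pvCeil_zero cap hc]
    · intro _
      rw [hS0, hP0]
      simp [pvCeil_zero cap hc]
  · rw [PySem.List.pyRange_neg_one_eq_nil (by omega), pvT_neg cap d p (n - 1) (by omega)]
    simp

-- ===== VERDICT (by name: the statement is the Claim_ definition above) =====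
theorem solution_spec : Claim_equal_solution := by
  unfold Claim_equal_solution
  intro cap n d p _hdom hpre
  obtain ⟨hc, hld, hlp, hnnd, hnnp⟩ := hpre
  unfold Spec_solution solution
  have hbelow : ∀ k : Int, 0 ≤ k → k < n - 1 →
      0 ≤ PySem.List.pyGetD d k 0 ∧ 0 ≤ PySem.List.pyGetD p k 0 := fun k h1 h2 =>
    ⟨pvPre_get d n hld hnnd k h1 (by omega), pvPre_get p n hlp hnnp k h1 (by omega)⟩
  have htop : 0 ≤ n - 1 →
      (0 ≤ PySem.List.pyGetD d (n - 1) 0 ∧ 0 ≤ PySem.List.pyGetD p (n - 1) 0) ∨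
      (0 < PySem.List.pyGetD d (n - 1) 0 ∨ 0 < PySem.List.pyGetD p (n - 1) 0) := fun h =>
    Or.inl ⟨pvPre_get d n hld hnnd (n - 1) h (by omega), pvPre_get p n hlp hnnp (n - 1) h (by omega)⟩
  have hfuel : pvT cap d p (n - 1) < (((pvT cap d p (n - 1)).toNat + 1 : Nat) : Int) := by
    have := pvT_nonneg cap d p (n - 1)
    omega
  rw [pvOuter_eq cap hc _ (n - 1) d p 0 (by omega) (by omega) hbelow htop hfuel,
    solution_alt_eq cap n d p hc hld hlp hnnd hnnp]
  ring
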